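-- pv_equiv track=rewrite | github.com/ValentinAvramko/editorial-skill-for-natural-russian-business-writing | scripts/eval_runner.py | trim_blank_edges
-- ===== SOURCE A (Python) =====
-- def trim_blank_edges(lines: list[str]) -> list[str]:
--     start = 0
--     end = len(lines)
--     while start < end and not lines[start].strip():
--         start += 1
--     while end > start and not lines[end - 1].strip():
--         end -= 1
--     return lines[start:end]
-- ===== SOURCE B (Python) =====
-- def trim_blank_edges(lines: list[str]) -> list[str]:
--     def drop_leading(xs):
--         for i, line in enumerate(xs):
--             if line.strip():
--                 return xs[i:]
--         return []
--     return drop_leading(drop_leading(lines)[::-1])[::-1]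
-- ===== Notes on version B (the rewrite author's own statement) =====
-- stated objective: simpler
-- what changed: B trims both edges with one reusable drop-leading pass applied to the list and then to its reversal, instead of A's two inward-moving index pointers followed by a slice.
import Mathlib
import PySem

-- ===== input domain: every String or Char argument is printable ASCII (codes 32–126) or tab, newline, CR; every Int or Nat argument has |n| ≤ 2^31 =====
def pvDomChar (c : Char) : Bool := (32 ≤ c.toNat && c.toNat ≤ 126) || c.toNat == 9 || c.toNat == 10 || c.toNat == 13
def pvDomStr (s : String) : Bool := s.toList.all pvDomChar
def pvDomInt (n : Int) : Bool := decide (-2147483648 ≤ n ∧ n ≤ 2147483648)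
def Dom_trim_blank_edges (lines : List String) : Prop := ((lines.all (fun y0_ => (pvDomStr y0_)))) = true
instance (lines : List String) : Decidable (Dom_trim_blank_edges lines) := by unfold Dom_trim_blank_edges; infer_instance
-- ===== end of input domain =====

-- B trims both edges with one reusable drop-leading pass applied to the list and to its
-- reversal, instead of A's two inward-moving index pointers followed by a slice (objective: simpler).

-- ===== PORT A =====
-- `not line.strip()` : the stripped string is empty
def pvBlank (s : String) : Bool := PySem.Str.strip s == ""

-- `while start < end and not lines[start].strip(): start += 1`
-- (index is always in range when read, so List.getD is exact here)
def pvLoopStart (lines : List String) (start e : Nat) : Nat :=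
  if start < e then
    if pvBlank (lines.getD start "") then pvLoopStart lines (start + 1) e else start
  else start
termination_by e - start

-- `while end > start and not lines[end - 1].strip(): end -= 1`
def pvLoopEnd (lines : List String) (start e : Nat) : Nat :=
  if start < e then
    if pvBlank (lines.getD (e - 1) "") then pvLoopEnd lines start (e - 1) else e
  else e
termination_by e - start

def trim_blank_edges (lines : List String) : List String :=
  let start := pvLoopStart lines 0 lines.length
  let e := pvLoopEnd lines start lines.length
  PySem.List.slice lines (some (start : Int)) (some (e : Int))

-- ===== PORT B =====
-- `drop_leading`: scan for the first non-blank line and keep the suffix from there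
def pvDropLeading : List String → List String
  | [] => []
  | x :: xs => if pvBlank x then pvDropLeading xs else x :: xs

def trim_blank_edges_alt (lines : List String) : List String :=
  (pvDropLeading ((pvDropLeading lines).reverse)).reverse

-- ===== PRECONDITION & SPEC =====
def Spec_trim_blank_edges (lines : List String) (out : List String) : Prop := out = trim_blank_edges_alt lines
instance (lines : List String) (out : List String) : Decidable (Spec_trim_blank_edges lines out) := by unfold Spec_trim_blank_edges; infer_instance

-- ===== CLAIM (what is proved, stated in full; the proofs are below) =====
def Claim_equal_trim_blank_edges : Prop := ∀ (lines : List String), Dom_trim_blank_edges lines → Spec_trim_blank_edges lines (trim_blank_edges lines)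

-- ===== LEMMAS AND PROOFS =====

theorem pvDropLeading_eq_dropWhile (l : List String) : pvDropLeading l = l.dropWhile pvBlank := by
  induction l with
  | nil => rfl
  | cons x xs ih => simp only [pvDropLeading, List.dropWhile]; cases pvBlank x <;> simp [ih]

theorem dropWhile_eq_drop_length_takeWhile (p : String → Bool) (l : List String) :
    l.dropWhile p = l.drop (l.takeWhile p).length := by
  induction l with
  | nil => rfl
  | cons x xs ih =>
    by_cases h : p x <;> simp [h, ih]

theorem length_takeWhile_le (p : String → Bool) (l : List String) :
    (l.takeWhile p).length ≤ l.length := by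
  simpa using (List.takeWhile_sublist (p := p) (l := l)).length_le

theorem takeWhile_boundary (p : String → Bool) (l : List String)
    (h : (l.takeWhile p).length < l.length) : p (l.getD (l.takeWhile p).length "") = false := by
  induction l with
  | nil => simp at h
  | cons x xs ih =>
    by_cases hp : p x
    · simp [hp] at h ⊢
      exact ih (by omega)
    · simp [hp]

-- the first pointer loop computes the length of the blank prefix
theorem pvLoopStart_spec (lines : List String) (s : Nat) (hs : s ≤ lines.length) :
    pvLoopStart lines s lines.length = s + ((lines.drop s).takeWhile pvBlank).length := by
  by_cases h : s < lines.length
  · rw [pvLoopStart]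
    have hget : lines.getD s "" = lines[s] := List.getD_eq_getElem lines "" h
    have hdrop : lines.drop s = lines[s] :: lines.drop (s + 1) := List.drop_eq_getElem_cons h
    by_cases hb : pvBlank lines[s]
    · rw [if_pos h, if_pos (by rw [hget]; exact hb), pvLoopStart_spec lines (s + 1) (by omega),
        hdrop, List.takeWhile_cons, if_pos hb]
      simp; omega
    · rw [if_pos h, if_neg (by rw [hget]; exact hb), hdrop, List.takeWhile_cons, if_neg hb]
      simp
  · have : s = lines.length := by omega
    subst this
    rw [pvLoopStart, if_neg (by omega)]
    simp
termination_by lines.length - s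

-- the second pointer loop computes the position after the last non-blank line,
-- provided position s itself holds a non-blank line (which pins the guard)
theorem pvLoopEnd_spec (lines : List String) (s : Nat) (hnb : pvBlank (lines.getD s "") = false) :
    ∀ e, s < e → e ≤ lines.length →
      pvLoopEnd lines s e = e - ((lines.take e).reverse.takeWhile pvBlank).length := by
  intro e hse he
  rw [pvLoopEnd, if_pos hse]
  have hlt : e - 1 < lines.length := by omega
  have hget : lines.getD (e - 1) "" = lines[e - 1] := List.getD_eq_getElem lines "" hlt
  have htake : lines.take e = lines.take (e - 1) ++ [lines[e - 1]] := by
    conv_lhs => rw [show e = (e - 1) + 1 by omega]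
    rw [List.take_add_one]
    simp [List.getElem?_eq_getElem hlt]
  rw [htake]
  simp only [List.reverse_append, List.reverse_cons, List.reverse_nil, List.nil_append,
    List.singleton_append, List.takeWhile_cons]
  by_cases hb : pvBlank lines[e - 1]
  · have hs_lt : s < e - 1 := by
      rcases Nat.lt_or_ge s (e - 1) with h' | h'
      · exact h'
      · exfalso
        have : s = e - 1 := by omega
        rw [this, hget] at hnb
        rw [hnb] at hb; exact Bool.noConfusion hb
    rw [if_pos (by rw [hget]; exact hb), hb,
      pvLoopEnd_spec lines s hnb (e - 1) hs_lt (by omega)]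
    have hlen : ((lines.take (e - 1)).reverse.takeWhile pvBlank).length ≤ e - 1 := by
      have h1 := length_takeWhile_le pvBlank (lines.take (e - 1)).reverse
      simp [List.length_take] at h1
      omega
    simp only [if_true, List.length_cons]
    omega
  · rw [if_neg (by rw [hget]; exact hb), Bool.eq_false_iff.mpr hb]
    simp
termination_by e => e - s

-- takeWhile over an append stops inside the left part if that part has a failing element
theorem takeWhile_append_of_exists (p : String → Bool) (xs ys : List String)
    (h : ∃ x ∈ xs, p x = false) : (xs ++ ys).takeWhile p = xs.takeWhile p := by
  induction xs with
  | nil => rcases h with ⟨x, hx, _⟩; simp at hx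
  | cons a l ih =>
    by_cases ha : p a
    · rcases h with ⟨x, hx, hpx⟩
      rcases List.mem_cons.mp hx with rfl | hx'
      · rw [ha] at hpx; exact Bool.noConfusion hpx
      · simp [ha, ih ⟨x, hx', hpx⟩]
    · simp [ha]

-- ===== VERDICT (by name: the statement is the Claim_ definition above) =====
theorem trim_blank_edges_spec : Claim_equal_trim_blank_edges := by
  intro lines _
  unfold Spec_trim_blank_edges trim_blank_edges trim_blank_edges_alt
  dsimp only
  simp only [pvDropLeading_eq_dropWhile]
  have hstart := pvLoopStart_spec lines 0 (by omega)
  simp only [List.drop_zero, Nat.zero_add] at hstart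
  set k := (lines.takeWhile pvBlank).length with hk
  have hkle : k ≤ lines.length := by rw [hk]; exact length_takeWhile_le _ _
  rw [hstart]
  by_cases hkn : k = lines.length
  · -- every line is blank: both sides are []
    rw [pvLoopEnd, if_neg (by omega), hkn, PySem.List.slice_natCast]
    have hdw : lines.dropWhile pvBlank = [] := by
      rw [dropWhile_eq_drop_length_takeWhile, ← hk, hkn, List.drop_length]
    simp [hdw]
  · -- there is a non-blank line
    have hklt : k < lines.length := by omega
    have hnb : pvBlank (lines.getD k "") = false := by
      rw [hk]; exact takeWhile_boundary pvBlank lines (by omega)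
    rw [pvLoopEnd_spec lines k hnb lines.length hklt (by omega)]
    -- notation: t = lines with the blank prefix removed, r = number of trailing blank lines
    set t := lines.dropWhile pvBlank with ht
    have htd : t = lines.drop k := by rw [ht, hk, dropWhile_eq_drop_length_takeWhile]
    have htl : t.length = lines.length - k := by rw [htd, List.length_drop]
    have hrev : lines.reverse = t.reverse ++ (lines.takeWhile pvBlank).reverse := by
      conv_lhs => rw [← List.takeWhile_append_dropWhile (p := pvBlank) (l := lines), ← ht]
      rw [List.reverse_append]
    have hthead : ∃ x ∈ t.reverse, pvBlank x = false := by
      refine ⟨lines[k], ?_, ?_⟩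
      · rw [List.mem_reverse, htd, List.drop_eq_getElem_cons hklt]
        exact List.mem_cons_self ..
      · rw [List.getD_eq_getElem lines "" hklt] at hnb; exact hnb
    set r := ((lines.take lines.length).reverse.takeWhile pvBlank).length with hr
    have hr' : r = (t.reverse.takeWhile pvBlank).length := by
      rw [hr, List.take_length, hrev, takeWhile_append_of_exists pvBlank _ _ hthead]
    have hrle : r ≤ t.length := by
      rw [hr']
      simpa using length_takeWhile_le pvBlank t.reverse
    rw [PySem.List.slice_natCast, ← htd,
      dropWhile_eq_drop_length_takeWhile, ← hr', List.reverse_drop]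
    simp only [List.reverse_reverse, List.length_reverse]
    congr 1
    omega
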